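-- pv_equiv track=rewrite | github.com/69BLACKCAT69/Monte-Carlo | SIMULACIÓN-1.py | verificar_condiciones
-- ===== SOURCE A (Python) =====
-- def verificar_condiciones(x0, t, p, a, m, c):
--     # Condición 1: x0 debe ser un número entero impar no divisible entre 2 y 5
--     condicion_1 = x0 % 2 != 0 and x0 % 5 != 0
--
--     # Condición 2: c debe ser un entero impar relativamente primo a m
--     def determinar_relativamente_primos(c, m):
--         factores_num1 = [i for i in range(1, c+1) if c % i == 0]
--         factores_num2 = [i for i in range(1, m+1) if m % i == 0]
--         factores_comunes = [factor for factor in factores_num1 if factor in factores_num2]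
--
--         if len(factores_comunes) == 1 and 1 in factores_comunes:
--             return True
--         else:
--             return False
--     condicion_2 = determinar_relativamente_primos(c, m)
--
--     return condicion_1 and condicion_2
-- ===== SOURCE B (Python) =====
-- def verificar_condiciones(x0, t, p, a, m, c):
--     # Condicion 1: x0 odd and not divisible by 5 (Python modulo, exact for negatives too)
--     if x0 % 2 == 0 or x0 % 5 == 0:
--         return False
--     # Condicion 2: coprimality via an iterative Euclidean gcd; divisor enumeration
--     # is only meaningful for positive arguments, so non-positive c or m fails.
--     if c <= 0 or m <= 0:
--         return False
--     g, b = c, m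
--     while b:
--         g, b = b, g % b
--     return g == 1
-- ===== Notes on version B (the rewrite author's own statement) =====
-- stated objective: faster
-- what changed: Coprimality is decided by an iterative Euclidean gcd with early returns instead of enumerating all divisors of c and of m and intersecting the two lists.
import Mathlib
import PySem

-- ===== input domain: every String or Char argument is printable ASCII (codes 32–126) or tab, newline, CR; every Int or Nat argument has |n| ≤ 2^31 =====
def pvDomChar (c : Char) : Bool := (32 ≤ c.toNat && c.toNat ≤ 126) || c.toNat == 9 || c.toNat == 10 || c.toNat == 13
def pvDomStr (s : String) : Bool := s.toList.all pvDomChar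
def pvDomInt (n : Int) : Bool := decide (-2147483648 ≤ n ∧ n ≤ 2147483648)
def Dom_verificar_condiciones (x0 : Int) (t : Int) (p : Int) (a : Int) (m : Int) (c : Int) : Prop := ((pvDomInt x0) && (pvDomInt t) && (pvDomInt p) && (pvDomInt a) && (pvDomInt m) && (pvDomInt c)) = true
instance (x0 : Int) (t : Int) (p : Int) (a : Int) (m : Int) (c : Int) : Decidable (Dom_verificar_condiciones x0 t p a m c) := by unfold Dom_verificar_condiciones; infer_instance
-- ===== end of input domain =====

-- B replaces A's divisor-enumeration coprimality test by an iterative Euclidean gcd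
-- (with a positivity guard matching A's empty-divisor-list behaviour); objective: faster.

-- ===== PORT A =====
-- nested helper 'determinar_relativamente_primos' of A, transliterated
def determinar_relativamente_primos (c : Int) (m : Int) : Bool :=
  let factores_num1 := (PySem.List.pyRange 1 (c+1) 1).filter (fun i => PySem.Int.mod c i == 0)
  let factores_num2 := (PySem.List.pyRange 1 (m+1) 1).filter (fun i => PySem.Int.mod m i == 0)
  let factores_comunes := factores_num1.filter (fun factor => factores_num2.contains factor)
  if factores_comunes.length == 1 && factores_comunes.contains 1 then true else false

def verificar_condiciones (x0 : Int) (t : Int) (p : Int) (a : Int) (m : Int) (c : Int) : Bool :=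
  let condicion_1 := (PySem.Int.mod x0 2 != 0) && (PySem.Int.mod x0 5 != 0)
  let condicion_2 := determinar_relativamente_primos c m
  condicion_1 && condicion_2

-- ===== PORT B =====
-- B's 'while b: g, b = b, g % b' loop
def gcdLoop (g : Int) (b : Int) : Int :=
  if h : b = 0 then g
  else gcdLoop b (PySem.Int.mod g b)
termination_by b.natAbs
decreasing_by
  rcases lt_or_gt_of_ne h with hb | hb
  · have := PySem.Int.mod_neg_bounds g hb
    omega
  · have h1 := PySem.Int.mod_nonneg g hb
    have h2 := PySem.Int.mod_lt g hb
    omega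

def verificar_condiciones_alt (x0 : Int) (t : Int) (p : Int) (a : Int) (m : Int) (c : Int) : Bool :=
  if PySem.Int.mod x0 2 == 0 || PySem.Int.mod x0 5 == 0 then false
  else if c ≤ 0 || m ≤ 0 then false
  else gcdLoop c m == 1

-- ===== PRECONDITION & SPEC =====
def Spec_verificar_condiciones (x0 : Int) (t : Int) (p : Int) (a : Int) (m : Int) (c : Int) (out : Bool) : Prop := out = verificar_condiciones_alt x0 t p a m c
instance (x0 : Int) (t : Int) (p : Int) (a : Int) (m : Int) (c : Int) (out : Bool) : Decidable (Spec_verificar_condiciones x0 t p a m c out) := by unfold Spec_verificar_condiciones; infer_instance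

-- ===== CLAIM (what is proved, stated in full; the proofs are below) =====
def Claim_equal_verificar_condiciones : Prop := ∀ (x0 : Int) (t : Int) (p : Int) (a : Int) (m : Int) (c : Int), Dom_verificar_condiciones x0 t p a m c → Spec_verificar_condiciones x0 t p a m c (verificar_condiciones x0 t p a m c)

-- ===== LEMMAS AND PROOFS =====

-- proof-only abbreviation for A's list of common factors
def fcAux (c m : Int) : List Int :=
  ((PySem.List.pyRange 1 (c+1) 1).filter (fun i => PySem.Int.mod c i == 0)).filter
    (fun factor => ((PySem.List.pyRange 1 (m+1) 1).filter (fun i => PySem.Int.mod m i == 0)).contains factor)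

theorem determinar_unfold (c m : Int) :
    determinar_relativamente_primos c m =
      if ((fcAux c m).length == 1 && (fcAux c m).contains 1) then true else false := rfl

-- the Euclidean loop computes Int.gcd on nonnegative state
theorem gcdLoop_eq_gcd (g b : Int) (hg : 0 ≤ g) (hb : 0 ≤ b) :
    gcdLoop g b = (Int.gcd g b : Int) := by
  by_cases h : b = 0
  · subst h
    rw [gcdLoop]
    simp [Int.gcd, Int.natAbs_of_nonneg hg]
  · have hbpos : 0 < b := lt_of_le_of_ne hb (Ne.symm h)
    rw [gcdLoop]
    simp only [h, dif_neg, not_false_iff]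
    rw [gcdLoop_eq_gcd b (PySem.Int.mod g b) hb (PySem.Int.mod_nonneg g hbpos)]
    rw [PySem.Int.mod_eq_emod_of_pos (a := g) hbpos]
    rw [Int.gcd_comm b (g % b), Int.gcd_emod, Int.gcd_comm]
termination_by b.natAbs
decreasing_by
  have h1 := PySem.Int.mod_nonneg g hbpos
  have h2 := PySem.Int.mod_lt g hbpos
  omega

theorem mem_fcAux (c m x : Int) (hc : 0 < c) (hm : 0 < m) :
    x ∈ fcAux c m ↔ (1 ≤ x ∧ x ∣ c ∧ x ∣ m) := by
  simp only [fcAux, List.mem_filter, List.contains_iff_mem, PySem.List.mem_pyRange_one,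
    beq_iff_eq, PySem.Int.mod_eq_zero_iff_dvd]
  constructor
  · rintro ⟨⟨⟨hx1, _⟩, hxc⟩, _, hxm⟩
    exact ⟨hx1, hxc, hxm⟩
  · rintro ⟨hx1, hxc, hxm⟩
    have h1 := Int.le_of_dvd hc hxc
    have h2 := Int.le_of_dvd hm hxm
    exact ⟨⟨⟨hx1, by omega⟩, hxc⟩, ⟨hx1, by omega⟩, hxm⟩

theorem nodup_fcAux (c m : Int) : (fcAux c m).Nodup :=
  ((PySem.List.nodup_pyRange_one 1 (c+1)).filter _).filter _

theorem determinar_eq_gcd (c m : Int) (hc : 0 < c) (hm : 0 < m) :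
    determinar_relativamente_primos c m = (gcdLoop c m == 1) := by
  rw [gcdLoop_eq_gcd c m (le_of_lt hc) (le_of_lt hm), determinar_unfold]
  have hmem := fun x => mem_fcAux c m x hc hm
  have hnd := nodup_fcAux c m
  have h1 : (1 : Int) ∈ fcAux c m := (hmem 1).mpr ⟨le_refl 1, one_dvd c, one_dvd m⟩
  by_cases hg : Int.gcd c m = 1
  · -- every common factor divides gcd = 1, so the list is [1]
    have hall : ∀ x ∈ fcAux c m, x = (1 : Int) := by
      intro x hx
      obtain ⟨hx1, hxc, hxm⟩ := (hmem x).mp hx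
      have hna : x.natAbs ∣ Int.gcd c m :=
        Nat.dvd_gcd (Int.natAbs_dvd_natAbs.mpr hxc) (Int.natAbs_dvd_natAbs.mpr hxm)
      have hdg : x ∣ (Int.gcd c m : Int) := Int.natAbs_dvd.mp (Int.natCast_dvd_natCast.mpr hna)
      rw [hg] at hdg
      have := Int.le_of_dvd (by norm_num) hdg
      omega
    have hfc1 : fcAux c m = [1] := by
      cases hfcs : fcAux c m with
      | nil => rw [hfcs] at h1; simp at h1
      | cons y ys =>
        have hy : y = 1 := hall y (by rw [hfcs]; exact List.mem_cons_self)
        have hys : ys = [] := by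
          cases hyss : ys with
          | nil => rfl
          | cons z zs =>
            exfalso
            have hz : z = 1 := hall z (by rw [hfcs, hyss]; simp)
            rw [hfcs, hyss] at hnd
            simp [hy, hz] at hnd
        rw [hy, hys]
    rw [hfc1]
    simp [hg]
  · -- gcd ≥ 2: both 1 and the gcd are in the list, so its length is not 1
    have hgpos : 0 < Int.gcd c m := Int.gcd_pos_of_ne_zero_left m (by omega)
    have hg2 : 2 ≤ Int.gcd c m := by omega
    have hgin : ((Int.gcd c m : Int)) ∈ fcAux c m :=
      (hmem _).mpr ⟨by exact_mod_cast hgpos, Int.gcd_dvd_left c m, Int.gcd_dvd_right c m⟩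
    have hlen : (fcAux c m).length ≠ 1 := by
      intro hl
      obtain ⟨y, hy⟩ := List.length_eq_one_iff.mp hl
      rw [hy] at h1 hgin
      simp at h1 hgin
      omega
    have hl : ((fcAux c m).length == 1) = false := by simp [hlen]
    have hr : ((Int.gcd c m : Int) == 1) = false := by simp; omega
    rw [hl, hr]
    simp

theorem determinar_nonpos_c (c m : Int) (hcle : c ≤ 0) :
    determinar_relativamente_primos c m = false := by
  rw [determinar_unfold]
  have : fcAux c m = [] := by
    simp [fcAux, PySem.List.pyRange_one_eq_nil (show c + 1 ≤ 1 by omega)]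
  rw [this]
  simp

theorem determinar_nonpos_m (c m : Int) (hmle : m ≤ 0) :
    determinar_relativamente_primos c m = false := by
  rw [determinar_unfold]
  have : fcAux c m = [] := by
    simp [fcAux, PySem.List.pyRange_one_eq_nil (show m + 1 ≤ 1 by omega)]
  rw [this]
  simp

-- ===== VERDICT (by name: the statement is the Claim_ definition above) =====
theorem verificar_condiciones_spec : Claim_equal_verificar_condiciones := by
  intro x0 t p a m c _
  unfold Spec_verificar_condiciones verificar_condiciones verificar_condiciones_alt
  show (((PySem.Int.mod x0 2 != 0) && (PySem.Int.mod x0 5 != 0)) &&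
      determinar_relativamente_primos c m) = _
  have hb : ((PySem.Int.mod x0 2 != 0) && (PySem.Int.mod x0 5 != 0)) =
      !(PySem.Int.mod x0 2 == 0 || PySem.Int.mod x0 5 == 0) := by
    rw [show (PySem.Int.mod x0 2 != 0) = !(PySem.Int.mod x0 2 == 0) from rfl,
        show (PySem.Int.mod x0 5 != 0) = !(PySem.Int.mod x0 5 == 0) from rfl]
    cases (PySem.Int.mod x0 2 == 0) <;> cases (PySem.Int.mod x0 5 == 0) <;> rfl
  rw [hb]
  by_cases h1 : (PySem.Int.mod x0 2 == 0 || PySem.Int.mod x0 5 == 0) = true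
  · rw [if_pos h1, h1]
    rfl
  · have h1f : (PySem.Int.mod x0 2 == 0 || PySem.Int.mod x0 5 == 0) = false :=
      Bool.not_eq_true _ ▸ eq_false_of_ne_true h1
    rw [if_neg h1, h1f]
    simp only [Bool.not_false, Bool.true_and]
    by_cases hcle : c ≤ 0
    · rw [determinar_nonpos_c c m hcle, if_pos (by simp [hcle])]
    · by_cases hmle : m ≤ 0
      · rw [determinar_nonpos_m c m hmle, if_pos (by simp [hmle])]
      · rw [if_neg (by simp [hcle, hmle])]
        exact determinar_eq_gcd c m (by omega) (by omega)
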